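-- pv_equiv track=rewrite | github.com/rrherlih/programming311 | words.py | word_max
-- ===== SOURCE A (Python) =====
-- def word_max(word):
-- 	if len(word) == 1:
-- 		return word[0]
-- 	elif len(word) == 2:
-- 		if (word[0] >= word[1]):
-- 			return word[0]
-- 		else:
-- 			return word[1]
-- 	else:
-- 		maxs = ""
-- 		for i in range(0, len(word)//2 + 1):
-- 			if word[i] >= word[len(word) - 1 - i]:
-- 				maxs = maxs + word[i]
-- 			else:
-- 				maxs = maxs + word[len(word) - 1 - i]
-- 		return(word_max(maxs))
-- ===== SOURCE B (Python) =====
-- def word_max(word):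
--     m = word[0]
--     for c in word[1:]:
--         if c >= m:
--             m = c
--     return m
-- ===== Notes on version B (the rewrite author's own statement) =====
-- stated objective: simpler
-- what changed: Replaces A's recursive tournament (pairing word[i] with word[len-1-i] into a half-length string and recursing) with a single left-to-right scan keeping a running maximum character; both raise IndexError on the empty string, which Pre_ excludes.
import Mathlib
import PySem

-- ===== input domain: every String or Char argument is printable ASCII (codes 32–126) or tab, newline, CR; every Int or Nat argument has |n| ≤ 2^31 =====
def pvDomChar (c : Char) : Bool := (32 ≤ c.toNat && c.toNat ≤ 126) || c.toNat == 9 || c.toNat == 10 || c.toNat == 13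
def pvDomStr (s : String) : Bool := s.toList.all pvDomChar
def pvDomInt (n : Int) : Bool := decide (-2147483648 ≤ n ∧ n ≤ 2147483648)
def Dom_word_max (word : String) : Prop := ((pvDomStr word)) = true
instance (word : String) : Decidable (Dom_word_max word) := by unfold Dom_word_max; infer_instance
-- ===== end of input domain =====

-- B replaces A's recursive pairing tournament by a single running-maximum scan (simpler).
-- Both Pythons raise IndexError on the empty string; Pre_ excludes exactly that input.

-- ===== PORT A =====
-- termination helper for the recursive tournament (cited in decreasing_by)
theorem pvMaxsLen (w : List Char) (h0 : ¬ w.length = 0) (h1 : ¬ w.length = 1)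
    (h2 : ¬ w.length = 2) :
    ((PySem.List.pyRange 0 ((w.length : Int) / 2 + 1) 1).foldl
      (fun (maxs : List Char) (i : Int) =>
        if PySem.List.pyGetD w ((w.length : Int) - 1 - i) default ≤ PySem.List.pyGetD w i default
        then maxs ++ [PySem.List.pyGetD w i default]
        else maxs ++ [PySem.List.pyGetD w ((w.length : Int) - 1 - i) default]) []).length
      < w.length := by
  have key : ∀ (l : List Int) (acc : List Char),
      (l.foldl (fun (maxs : List Char) (i : Int) =>
        if PySem.List.pyGetD w ((w.length : Int) - 1 - i) default ≤ PySem.List.pyGetD w i default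
        then maxs ++ [PySem.List.pyGetD w i default]
        else maxs ++ [PySem.List.pyGetD w ((w.length : Int) - 1 - i) default]) acc).length
        = acc.length + l.length := by
    intro l
    induction l with
    | nil => simp
    | cons x xs ih =>
      intro acc
      rw [List.foldl_cons]
      split <;> rw [ih] <;> simp <;> omega
  rw [key, PySem.List.length_pyRange_one]
  simp only [List.length_nil]
  omega

-- literal transliteration of A: base cases for length 1 and 2, else pair word[i] with
-- word[len-1-i] over range(0, len//2+1) and recurse on the collected string.
-- (the `length = 0` guard only totalises the port: Python raises IndexError there, outside Pre_)
def wmA (w : List Char) : String :=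
  if h0 : w.length = 0 then ""
  else if h1 : w.length = 1 then String.mk [PySem.List.pyGetD w 0 default]
  else if h2 : w.length = 2 then
    if PySem.List.pyGetD w 1 default ≤ PySem.List.pyGetD w 0 default
    then String.mk [PySem.List.pyGetD w 0 default]
    else String.mk [PySem.List.pyGetD w 1 default]
  else
    let maxs := (PySem.List.pyRange 0 ((w.length : Int) / 2 + 1) 1).foldl
      (fun (maxs : List Char) (i : Int) =>
        if PySem.List.pyGetD w ((w.length : Int) - 1 - i) default ≤ PySem.List.pyGetD w i default
        then maxs ++ [PySem.List.pyGetD w i default]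
        else maxs ++ [PySem.List.pyGetD w ((w.length : Int) - 1 - i) default]) []
    wmA maxs
termination_by w.length
decreasing_by
  simpa using pvMaxsLen w h0 h1 h2

def word_max (word : String) : String := wmA word.toList

-- ===== PORT B =====
-- m = word[0]; for c in word[1:]: if c >= m: m = c; return m
-- (empty input: Python raises IndexError, outside Pre_; the port returns "")
def word_max_alt (word : String) : String :=
  match word.toList with
  | [] => ""
  | c :: rest => String.mk [rest.foldl (fun m x => if m ≤ x then x else m) c]

-- ===== PRECONDITION & SPEC =====
-- Pre_ excludes only the empty string, on which both Pythons raise IndexError.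
def Pre_word_max (word : String) : Prop := word ≠ ""
instance (word : String) : Decidable (Pre_word_max word) := by unfold Pre_word_max; infer_instance
def pvWitness_word_max : String := "banana"

def Spec_word_max (word : String) (out : String) : Prop := out = word_max_alt word
instance (word : String) (out : String) : Decidable (Spec_word_max word out) := by unfold Spec_word_max; infer_instance

-- ===== CLAIM (what is proved, stated in full; the proofs are below) =====
def Claim_equal_word_max : Prop := ∀ (word : String), Dom_word_max word → Pre_word_max word → Spec_word_max word (word_max word)

-- ===== LEMMAS AND PROOFS =====

theorem foldl_max_eq (c : Char) (rest : List Char) :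
    rest.foldl (fun m x => if m ≤ x then x else m) c = rest.foldl max c := by
  induction rest generalizing c with
  | nil => rfl
  | cons x xs ih => simp only [List.foldl_cons, ih, max_def]

theorem word_max_alt_max? (word : String) (m : Char) (h : word.toList.max? = some m) :
    word_max_alt word = String.mk [m] := by
  unfold word_max_alt
  cases hw : word.toList with
  | nil => rw [hw] at h; simp [List.max?] at h
  | cons c rest =>
    rw [hw] at h
    simp only [List.max?, Option.some.injEq] at h
    show String.mk [rest.foldl (fun m x => if m ≤ x then x else m) c] = String.mk [m]
    rw [foldl_max_eq, h]

-- the tournament round, as a map over natural indices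
theorem maxs_eq (w : List Char) (h3 : 3 ≤ w.length) :
    ((PySem.List.pyRange 0 ((w.length : Int) / 2 + 1) 1).foldl
      (fun (maxs : List Char) (i : Int) =>
        if PySem.List.pyGetD w ((w.length : Int) - 1 - i) default ≤ PySem.List.pyGetD w i default
        then maxs ++ [PySem.List.pyGetD w i default]
        else maxs ++ [PySem.List.pyGetD w ((w.length : Int) - 1 - i) default]) [])
    = (List.range (w.length / 2 + 1)).map
        (fun k => max (w.getD (w.length - 1 - k) default) (w.getD k default)) := by
  have key : ∀ (l : List Int) (acc : List Char),
      (l.foldl (fun (maxs : List Char) (i : Int) =>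
        if PySem.List.pyGetD w ((w.length : Int) - 1 - i) default ≤ PySem.List.pyGetD w i default
        then maxs ++ [PySem.List.pyGetD w i default]
        else maxs ++ [PySem.List.pyGetD w ((w.length : Int) - 1 - i) default]) acc)
      = acc ++ l.map (fun i => max (PySem.List.pyGetD w ((w.length : Int) - 1 - i) default)
          (PySem.List.pyGetD w i default)) := by
    intro l
    induction l with
    | nil => simp
    | cons x xs ih =>
      intro acc
      rw [List.foldl_cons, ih, List.map_cons]
      by_cases hba : PySem.List.pyGetD w ((w.length : Int) - 1 - x) default ≤ PySem.List.pyGetD w x default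
      · rw [if_pos hba, max_eq_right hba]; simp
      · rw [if_neg hba, max_eq_left (not_le.mp hba).le]; simp
  have hr : PySem.List.pyRange 0 ((w.length : Int) / 2 + 1) 1
      = (List.range (w.length / 2 + 1)).map (fun k : Nat => (k : Int)) := by
    rw [PySem.List.pyRange_one]
    have ht : ((w.length : Int) / 2 + 1 - 0).toNat = w.length / 2 + 1 := by omega
    rw [ht]
    apply List.map_congr_left
    intro a _
    omega
  rw [key, hr, List.map_map, List.nil_append]
  apply List.map_congr_left
  intro k hk
  have hk' : k < w.length / 2 + 1 := List.mem_range.mp hk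
  have h1 : ((w.length : Int) - 1 - (k : Int)) = ((w.length - 1 - k : Nat) : Int) := by omega
  simp only [Function.comp_apply, h1, PySem.List.pyGetD_natCast]

theorem getD_mem (w : List Char) (k : Nat) (hk : k < w.length) :
    w.getD k default ∈ w := by
  rw [List.getD_eq_getElem w default hk]
  exact List.getElem_mem hk

-- one tournament round preserves the maximum
theorem maxs_max? (w : List Char) (m : Char) (h3 : 3 ≤ w.length)
    (hm : w.max? = some m) :
    ((List.range (w.length / 2 + 1)).map
      (fun k => max (w.getD (w.length - 1 - k) default) (w.getD k default))).max? = some m := by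
  rw [List.max?_eq_some_iff] at hm ⊢
  obtain ⟨hmem, hub⟩ := hm
  obtain ⟨j, hj, hjm⟩ := List.getElem_of_mem hmem
  have h1 : w.getD j default = m := by rw [List.getD_eq_getElem w default hj]; exact hjm
  constructor
  · -- m appears in the round: at index j if j ≤ len/2, else at index len-1-j
    by_cases hle : j ≤ w.length / 2
    · refine List.mem_map.mpr ⟨j, List.mem_range.mpr (by omega), ?_⟩
      have h2 : w.getD (w.length - 1 - j) default ≤ m := hub _ (getD_mem w _ (by omega))
      rw [h1]
      exact max_eq_right h2
    · have hgt : w.length / 2 < j := not_le.mp hle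
      refine List.mem_map.mpr ⟨w.length - 1 - j, List.mem_range.mpr (by omega), ?_⟩
      have he : w.length - 1 - (w.length - 1 - j) = j := by omega
      rw [he, h1]
      have h2 : w.getD (w.length - 1 - j) default ≤ m := hub _ (getD_mem w _ (by omega))
      exact max_eq_left h2
  · intro b hb
    obtain ⟨k, hk, hkb⟩ := List.mem_map.mp hb
    have hk' := List.mem_range.mp hk
    subst hkb
    exact max_le (hub _ (getD_mem w _ (by omega))) (hub _ (getD_mem w _ (by omega)))

-- A's tournament computes the maximum character (strong induction on the length)
theorem wmA_eq_max : ∀ (n : Nat) (w : List Char), w.length = n →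
    ∀ m, w.max? = some m → wmA w = String.mk [m] := by
  intro n
  induction n using Nat.strong_induction_on with
  | _ n ih =>
    intro w hn m hm
    unfold wmA
    by_cases h0 : w.length = 0
    · rw [List.length_eq_zero_iff] at h0; subst h0; simp [List.max?] at hm
    rw [dif_neg h0]
    by_cases h1 : w.length = 1
    · obtain ⟨c, hc⟩ := List.length_eq_one_iff.mp h1
      subst hc
      simp only [List.max?, Option.some.injEq] at hm
      rw [dif_pos h1, PySem.List.pyGetD_zero_cons]
      simp only [List.foldl_nil] at hm
      rw [hm]
    rw [dif_neg h1]
    by_cases h2 : w.length = 2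
    · obtain ⟨a, b, hab⟩ : ∃ a b, w = [a, b] := by
        match w, h2 with | [a, b], _ => exact ⟨a, b, rfl⟩
      subst hab
      simp only [List.max?, List.foldl_cons, List.foldl_nil, Option.some.injEq] at hm
      have hg0 : PySem.List.pyGetD [a, b] 0 default = a := PySem.List.pyGetD_zero_cons _ _ _
      have hg1 : PySem.List.pyGetD [a, b] 1 default = b := by
        simp [PySem.List.pyGetD, PySem.List.pyGet?, PySem.List.pyIdx?]
      rw [dif_pos h2, hg0, hg1]
      by_cases hba : b ≤ a
      · rw [if_pos hba, ← hm, max_eq_left hba]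
      · rw [if_neg hba, ← hm, max_eq_right (not_le.mp hba).le]
    · have h3 : 3 ≤ w.length := by omega
      rw [dif_neg h2]
      simp only [maxs_eq w h3]
      have hlen : ((List.range (w.length / 2 + 1)).map
          (fun k => max (w.getD (w.length - 1 - k) default) (w.getD k default))).length
          = w.length / 2 + 1 := by simp
      exact ih (w.length / 2 + 1) (by omega) _ hlen m (maxs_max? w m h3 hm)

theorem max?_isSome (w : List Char) (h : w ≠ []) : ∃ m, w.max? = some m := by
  cases w with
  | nil => exact absurd rfl h
  | cons c rest => exact ⟨_, rfl⟩

-- ===== VERDICT (by name: the statement is the Claim_ definition above) =====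
theorem word_max_spec : Claim_equal_word_max := by
  intro word _ hpre
  unfold Spec_word_max word_max
  have hne : word.toList ≠ [] := by
    intro h
    exact hpre (by simp_all)
  obtain ⟨m, hm⟩ := max?_isSome _ hne
  rw [wmA_eq_max word.toList.length word.toList rfl m hm, word_max_alt_max? word m hm]
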